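-- pv_equiv track=rewrite | github.com/NathanGracia/p9 | dashboard.py | feat_colors
-- ===== SOURCE A (Python) =====
-- def feat_colors(feat_names):
--     return [
--         '#f1c40f' if 'gold' in f else
--         '#9b59b6' if 'xp' in f else
--         '#2ecc71' if 'cs' in f else
--         '#e74c3c' if 'kill' in f or 'death' in f else
--         '#3498db' for f in feat_names
--     ]
-- ===== SOURCE B (Python) =====
-- # Staged overwrite passes: start with all-default colors, then sweep the whole
-- # list once per keyword in reverse priority order; the last overwrite wins.
-- PASSES = [
--     ('death', '#e74c3c'),
--     ('kill', '#e74c3c'),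
--     ('cs', '#2ecc71'),
--     ('xp', '#9b59b6'),
--     ('gold', '#f1c40f'),
-- ]
--
-- def feat_colors(feat_names):
--     colors = ['#3498db'] * len(feat_names)
--     for kw, color in PASSES:
--         colors = [color if kw in f else c for f, c in zip(feat_names, colors)]
--     return colors
-- ===== Notes on version B (the rewrite author's own statement) =====
-- stated objective: alternative
-- what changed: Replaced the per-element nested-ternary dispatch with staged whole-list overwrite passes: all entries start at the default color and one sweep per keyword, run in reverse priority order, overwrites matching positions so the last (highest-priority) write wins.
import Mathlib
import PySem

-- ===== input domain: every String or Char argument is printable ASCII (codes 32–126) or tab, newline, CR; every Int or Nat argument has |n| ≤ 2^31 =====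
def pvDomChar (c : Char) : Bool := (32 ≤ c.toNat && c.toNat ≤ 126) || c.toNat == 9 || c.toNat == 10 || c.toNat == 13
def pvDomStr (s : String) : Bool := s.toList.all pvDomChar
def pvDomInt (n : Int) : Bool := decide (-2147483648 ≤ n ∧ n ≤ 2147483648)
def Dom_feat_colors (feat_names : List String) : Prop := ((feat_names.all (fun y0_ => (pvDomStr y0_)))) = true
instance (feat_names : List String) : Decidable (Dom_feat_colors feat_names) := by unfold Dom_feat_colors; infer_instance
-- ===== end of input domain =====

-- B replaces the per-element nested-ternary dispatch with staged whole-list overwrite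
-- passes (one sweep per keyword, reverse priority order, last write wins); alternative structure, same cost.
-- ===== PORT A =====
def feat_colors (feat_names : List String) : List String :=
  feat_names.map (fun f =>
    if PySem.Str.isIn "gold" f then "#f1c40f"
    else if PySem.Str.isIn "xp" f then "#9b59b6"
    else if PySem.Str.isIn "cs" f then "#2ecc71"
    else if PySem.Str.isIn "kill" f || PySem.Str.isIn "death" f then "#e74c3c"
    else "#3498db")

-- ===== PORT B =====
def featPasses : List (String × String) :=
  [("death", "#e74c3c"), ("kill", "#e74c3c"), ("cs", "#2ecc71"), ("xp", "#9b59b6"), ("gold", "#f1c40f")]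

-- one 'colors = [color if kw in f else c for f, c in zip(feat_names, colors)]' sweep
def featPass (kw color : String) (feat_names colors : List String) : List String :=
  List.zipWith (fun f c => if PySem.Str.isIn kw f then color else c) feat_names colors

def feat_colors_alt (feat_names : List String) : List String :=
  featPasses.foldl (fun colors p => featPass p.1 p.2 feat_names colors)
    (feat_names.map (fun _ => "#3498db"))

-- ===== PRECONDITION & SPEC =====
def Spec_feat_colors (feat_names : List String) (out : List String) : Prop := out = feat_colors_alt feat_names
instance (feat_names : List String) (out : List String) : Decidable (Spec_feat_colors feat_names out) := by unfold Spec_feat_colors; infer_instance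

-- ===== CLAIM (what is proved, stated in full; the proofs are below) =====
def Claim_equal_feat_colors : Prop := ∀ (feat_names : List String), Dom_feat_colors feat_names → Spec_feat_colors feat_names (feat_colors feat_names)

-- ===== LEMMAS AND PROOFS =====

-- zipWith of a list with a map of itself is a single map.
theorem zipWith_map_self {α β : Type} (f : α → β → β) (g : α → β) (l : List α) :
    List.zipWith f l (l.map g) = l.map (fun x => f x (g x)) := by
  induction l with
  | nil => rfl
  | cons x xs ih => simp [ih]

-- Folding whole-list passes over a map commutes into a per-element fold.
theorem featPass_fold_map (ps : List (String × String)) (feat_names : List String)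
    (g : String → String) :
    ps.foldl (fun colors p => featPass p.1 p.2 feat_names colors) (feat_names.map g)
      = feat_names.map (fun f => ps.foldl (fun c p => if PySem.Str.isIn p.1 f then p.2 else c) (g f)) := by
  induction ps generalizing g with
  | nil => simp
  | cons p rest ih =>
    simp only [List.foldl_cons]
    have hz : featPass p.1 p.2 feat_names (feat_names.map g)
        = feat_names.map (fun f => if PySem.Str.isIn p.1 f then p.2 else g f) := by
      unfold featPass
      rw [zipWith_map_self]
    rw [hz, ih]

-- ===== VERDICT (by name: the statement is the Claim_ definition above) =====
theorem feat_colors_spec : Claim_equal_feat_colors := by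
  intro feat_names _
  unfold Spec_feat_colors feat_colors feat_colors_alt
  rw [featPass_fold_map]
  refine List.map_congr_left (fun f _ => ?_)
  simp only [featPasses, List.foldl_cons, List.foldl_nil]
  by_cases h1 : PySem.Str.isIn "gold" f = true <;>
  by_cases h2 : PySem.Str.isIn "xp" f = true <;>
  by_cases h3 : PySem.Str.isIn "cs" f = true <;>
  by_cases h4 : PySem.Str.isIn "kill" f = true <;>
  by_cases h5 : PySem.Str.isIn "death" f = true <;>
    simp_all
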